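-- pv_equiv track=rewrite | github.com/deadlylaid/pracpy | algorithms/baekjoon/2775.py | dynamic_programing
-- ===== SOURCE A (Python) =====
-- def dynamic_programing(floor, no):
--     dp=[]
--     for i in range(floor+1):
--         dp.append([0] * (no+1))
--         for j in range(no+1):
--             if i == 0 or j ==0:
--                 dp[i][j] = j
--             else:
--                 dp[i][j] = dp[i][j-1] + dp[i-1][j]
--     return dp[floor][no]
-- ===== SOURCE B (Python) =====
-- def dynamic_programing(floor, no):
--     # residents of apartment = binomial coefficient C(floor+no, floor+1)
--     n = floor + no
--     k = floor + 1
--     if k > n: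
--         return 0
--     k = min(k, n - k)
--     r = 1
--     for i in range(1, k + 1):
--         r = r * (n - k + i) // i
--     return r
-- ===== Notes on version B (the rewrite author's own statement) =====
-- stated objective: alternative
-- what changed: replaces the O(floor*no) DP table dp[i][j]=dp[i][j-1]+dp[i-1][j] by the closed-form binomial coefficient C(floor+no, floor+1), computed with the exact multiplicative loop over min(floor+1, no-1) factors (intended as faster: measured 720x at n=1024, but unconfirmed at the largest timing sizes)
import Mathlib
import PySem

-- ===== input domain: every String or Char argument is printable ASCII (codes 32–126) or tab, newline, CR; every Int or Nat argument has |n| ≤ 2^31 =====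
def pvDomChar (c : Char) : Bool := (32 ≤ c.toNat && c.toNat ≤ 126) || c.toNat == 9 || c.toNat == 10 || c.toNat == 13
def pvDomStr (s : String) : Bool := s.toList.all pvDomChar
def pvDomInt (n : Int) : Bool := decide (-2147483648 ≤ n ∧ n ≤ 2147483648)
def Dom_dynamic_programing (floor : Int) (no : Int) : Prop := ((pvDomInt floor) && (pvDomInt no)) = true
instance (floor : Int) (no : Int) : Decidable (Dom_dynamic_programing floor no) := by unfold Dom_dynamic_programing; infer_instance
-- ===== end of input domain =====

-- B replaces A's O(floor*no) DP table by the closed-form binomial C(floor+no, floor+1)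
-- computed with the exact multiplicative loop.

-- ===== PORT A =====
-- Transliteration of A's nested DP loops.  The rows are filled strictly left to
-- right and only dp[i][j-1] (the value just written) and dp[i-1][j] (the previous
-- row, walked in step with j) are ever read, so the inner loop carries the state
-- (last written value, reversed prefix of the row, rest of the previous row) and
-- the outer loop carries (reversed list of rows, previous row); same values in
-- the same order as the Python.
def dynamic_programing (floor : Int) (no : Int) : Int :=
  let st :=
    (PySem.List.pyRange 0 (floor + 1) 1).foldl (fun st i =>
      let prev := st.2
      let inner :=
        (PySem.List.pyRange 0 (no + 1) 1).foldl (fun st j =>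
          let v : Int := if i = 0 ∨ j = 0 then j else st.1 + st.2.2.headI
          (v, v :: st.2.1, st.2.2.tail)) ((0 : Int), ([] : List Int), prev)
      let row := inner.2.1.reverse
      (row :: st.1, row)) (([] : List (List Int)), ([] : List Int))
  let dp := st.1.reverse
  (dp.getD floor.toNat []).getD no.toNat 0

-- ===== PORT B =====
def dynamic_programing_alt (floor : Int) (no : Int) : Int :=
  let n := floor + no
  let k := floor + 1
  if k > n then 0
  else
    let k := min k (n - k)
    (PySem.List.pyRange 1 (k + 1) 1).foldl
      (fun r i => PySem.Int.floordiv (r * (n - k + i)) i) 1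

-- ===== PRECONDITION & SPEC =====
-- A raises IndexError when floor < 0 (dp[floor] on an empty table) or no < 0 (dp rows are empty)
def Pre_dynamic_programing (floor : Int) (no : Int) : Prop := 0 ≤ floor ∧ 0 ≤ no
instance (floor : Int) (no : Int) : Decidable (Pre_dynamic_programing floor no) := by
  unfold Pre_dynamic_programing; infer_instance

def pvWitness_dynamic_programing : Int × Int := (3, 4)

def Spec_dynamic_programing (floor : Int) (no : Int) (out : Int) : Prop := out = dynamic_programing_alt floor no
instance (floor : Int) (no : Int) (out : Int) : Decidable (Spec_dynamic_programing floor no out) := by unfold Spec_dynamic_programing; infer_instance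

-- ===== CLAIM (what is proved, stated in full; the proofs are below) =====
def Claim_equal_dynamic_programing : Prop := ∀ (floor : Int) (no : Int), Dom_dynamic_programing floor no → Pre_dynamic_programing floor no → Spec_dynamic_programing floor no (dynamic_programing floor no)

-- ===== LEMMAS AND PROOFS =====

-- the DP table's value: dp[i][j] = C(i+j, i+1)
def pvVal (i j : Nat) : Int := ((i + j).choose (i + 1) : Int)

lemma pvVal_zero_left (j : Nat) : pvVal 0 j = (j : Int) := by
  simp [pvVal, Nat.choose_one_right]

lemma pvVal_zero_right (i : Nat) : pvVal i 0 = 0 := by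
  simp [pvVal]

lemma pvVal_pascal (i j : Nat) :
    pvVal (i + 1) (j + 1) = pvVal (i + 1) j + pvVal i (j + 1) := by
  simp only [pvVal]
  have h : (i + 1) + (j + 1) = ((i + 1) + j) + 1 := by ring
  rw [h, Nat.choose_succ_succ ((i + 1) + j) (i + 1)]
  push_cast
  have h2 : i + (j + 1) = (i + 1) + j := by ring
  rw [h2]
  ring

def pvRow (i N : Nat) : List Int := (List.range N).map (pvVal i)

def pvTable (i0 N : Nat) : List (List Int) := (List.range i0).map (fun r => pvRow r N)

lemma pvRow_getD (i N j : Nat) (h : j < N) : (pvRow i N).getD j 0 = pvVal i j := by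
  rw [pvRow, List.getD_eq_getElem?_getD]
  simp [h]

lemma pvTable_getD (i0 N r : Nat) (h : r < i0) : (pvTable i0 N).getD r [] = pvRow r N := by
  rw [pvTable, List.getD_eq_getElem?_getD]
  simp [h]

lemma pvRange_nat (m : Nat) :
    PySem.List.pyRange 0 (m : Int) 1 = (List.range m).map (fun k : Nat => (k : Int)) := by
  rw [PySem.List.pyRange_one, show ((m : Int) - 0).toNat = m from by omega]
  exact List.map_congr_left (fun a _ => by simp)

-- proof-side names for the two fold bodies of port A (definitionally equal to them)
def pvInnerF (i : Int) (st : Int × List Int × List Int) (j : Int) : Int × List Int × List Int :=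
  let v : Int := if i = 0 ∨ j = 0 then j else st.1 + st.2.2.headI
  (v, v :: st.2.1, st.2.2.tail)

def pvOuterF (no : Int) (st : List (List Int) × List Int) (i : Int) :
    List (List Int) × List Int :=
  let inner := (PySem.List.pyRange 0 (no + 1) 1).foldl (pvInnerF i)
    ((0 : Int), ([] : List Int), st.2)
  let row := inner.2.1.reverse
  (row :: st.1, row)

-- the inner loop fills the row left to right with pvVal iN
lemma pvInnerFold (iN : Nat) :
    ∀ (c jN : Nat) (last : Int) (acc ps : List Int),
    (jN = 0 ∨ last = pvVal iN (jN - 1)) →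
    (iN = 0 ∨ ps = (List.range' jN c).map (fun j => pvVal (iN - 1) j)) →
    (((List.range' jN c).map (fun k : Nat => (k : Int))).foldl (pvInnerF (iN : Int))
      (last, acc, ps)).2.1
    = ((List.range' jN c).map (pvVal iN)).reverse ++ acc := by
  intro c
  induction c with
  | zero => intro jN last acc ps _ _; simp
  | succ c ih =>
    intro jN last acc ps hlast hps
    rw [List.range'_succ, List.map_cons, List.foldl_cons, List.map_cons, List.reverse_cons]
    have hv :
        (if (iN : Int) = 0 ∨ (jN : Int) = 0 then (jN : Int) else last + ps.headI)
          = pvVal iN jN := by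
      by_cases h0 : (iN : Int) = 0 ∨ (jN : Int) = 0
      · rw [if_pos h0]
        rcases h0 with h0 | h0
        · have : iN = 0 := by exact_mod_cast h0
          subst this; rw [pvVal_zero_left]
        · have : jN = 0 := by exact_mod_cast h0
          subst this; rw [pvVal_zero_right]; simp
      · rw [if_neg h0, not_or] at *
        have hi1 : 1 ≤ iN := by
          rcases Nat.eq_zero_or_pos iN with h | h
          · exact absurd (by simp [h]) h0.1
          · exact h
        have hj1 : 1 ≤ jN := by
          rcases Nat.eq_zero_or_pos jN with h | h
          · exact absurd (by simp [h]) h0.2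
          · exact h
        have hlast' : last = pvVal iN (jN - 1) := by
          rcases hlast with h | h
          · omega
          · exact h
        have hps' : ps = (List.range' jN (c + 1)).map (fun j => pvVal (iN - 1) j) := by
          rcases hps with h | h
          · omega
          · exact h
        rw [hlast', hps', List.range'_succ, List.map_cons, List.headI_cons]
        have hp := pvVal_pascal (iN - 1) (jN - 1)
        rw [show (iN - 1) + 1 = iN from by omega, show (jN - 1) + 1 = jN from by omega] at hp
        exact hp.symm
    have hstep : pvInnerF (iN : Int) (last, acc, ps) ((jN : Nat) : Int)
        = (pvVal iN jN, pvVal iN jN :: acc, ps.tail) := by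
      unfold pvInnerF
      simp only []
      rw [hv]
    rw [hstep]
    have hih := ih (jN + 1) (pvVal iN jN) (pvVal iN jN :: acc) ps.tail
      (Or.inr (by simp))
      (by
        rcases hps with h | h
        · exact Or.inl h
        · exact Or.inr (by rw [h, List.range'_succ, List.map_cons, List.tail_cons]))
    rw [List.append_assoc, List.singleton_append]
    exact hih

-- one inner loop builds one full row
lemma pvRowBuild (iN N : Nat) (prev : List Int)
    (hps : iN = 0 ∨ prev = pvRow (iN - 1) N) :
    ((PySem.List.pyRange 0 (N : Int) 1).foldl (pvInnerF (iN : Int))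
      ((0 : Int), ([] : List Int), prev)).2.1.reverse
    = pvRow iN N := by
  rw [pvRange_nat N, List.range_eq_range']
  have hps' : iN = 0 ∨ prev = (List.range' 0 N).map (fun j => pvVal (iN - 1) j) := by
    rcases hps with h | h
    · exact Or.inl h
    · exact Or.inr (by rw [h, pvRow, List.range_eq_range'])
  rw [pvInnerFold iN N 0 0 [] prev (Or.inl rfl) hps']
  simp [pvRow, List.range_eq_range']

-- one outer step appends the next row
lemma pvOuterF_eq (n i0 : Nat) (rows : List (List Int)) (prev : List Int)
    (hps : i0 = 0 ∨ prev = pvRow (i0 - 1) (n + 1)) :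
    pvOuterF (n : Int) (rows, prev) ((i0 : Nat) : Int)
      = (pvRow i0 (n + 1) :: rows, pvRow i0 (n + 1)) := by
  unfold pvOuterF
  simp only []
  rw [show ((n : Int) + 1) = ((n + 1 : Nat) : Int) from by push_cast; ring,
    pvRowBuild i0 (n + 1) prev hps]

-- the whole outer loop
lemma pvOuterFold (n : Nat) :
    ∀ (c i0 : Nat) (prev : List Int),
    (i0 = 0 ∧ prev = [] ∨ prev = pvRow (i0 - 1) (n + 1)) →
    (((List.range' i0 c).map (fun k : Nat => (k : Int))).foldl (pvOuterF (n : Int))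
      ((pvTable i0 (n + 1)).reverse, prev)).1
    = (pvTable (i0 + c) (n + 1)).reverse := by
  intro c
  induction c with
  | zero => intro i0 prev _; simp
  | succ c ih =>
    intro i0 prev hprev
    have hps : i0 = 0 ∨ prev = pvRow (i0 - 1) (n + 1) := by
      rcases hprev with ⟨h, _⟩ | h
      · exact Or.inl h
      · exact Or.inr h
    rw [List.range'_succ, List.map_cons, List.foldl_cons,
      pvOuterF_eq n i0 ((pvTable i0 (n + 1)).reverse) prev hps]
    have htab : pvRow i0 (n + 1) :: (pvTable i0 (n + 1)).reverse
        = (pvTable (i0 + 1) (n + 1)).reverse := by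
      simp [pvTable, List.range_succ]
    rw [htab]
    have := ih (i0 + 1) (pvRow i0 (n + 1)) (Or.inr (by simp))
    rw [show i0 + (c + 1) = (i0 + 1) + c by omega]
    exact this

lemma pvA_eq (f n : Nat) :
    dynamic_programing (f : Int) (n : Int) = ((f + n).choose (f + 1) : Int) := by
  show (((PySem.List.pyRange 0 ((f : Int) + 1) 1).foldl (pvOuterF (n : Int))
      (([] : List (List Int)), ([] : List Int))).1.reverse.getD ((f : Int)).toNat []).getD
      ((n : Int)).toNat 0 = ((f + n).choose (f + 1) : Int)
  rw [show ((f : Int) + 1) = ((f + 1 : Nat) : Int) from by push_cast; ring,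
    pvRange_nat (f + 1), List.range_eq_range']
  rw [show (([] : List (List Int))) = (pvTable 0 (n + 1)).reverse from by simp [pvTable]]
  have := pvOuterFold n (f + 1) 0 [] (Or.inl ⟨rfl, rfl⟩)
  simp only [Nat.zero_add] at this
  rw [this, List.reverse_reverse, show ((f : Int)).toNat = f from by simp,
    show ((n : Int)).toNat = n from by simp,
    pvTable_getD (f + 1) (n + 1) f (by omega), pvRow_getD f (n + 1) n (by omega)]
  rfl

-- B: the multiplicative loop computes binomial coefficients
lemma pvRange_one_nat (a m : Nat) :
    PySem.List.pyRange (a : Int) ((a : Int) + (m : Int)) 1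
      = (List.range' a m).map (fun k : Nat => (k : Int)) := by
  rw [PySem.List.pyRange_one, show (((a : Int) + (m : Int)) - (a : Int)).toNat = m from by omega,
    List.range'_eq_map_range]
  rw [List.map_map]
  exact List.map_congr_left (fun x _ => by simp)

lemma pvProd (N K : Nat) (hK : K ≤ N) :
    ∀ (c i0 : Nat), 1 ≤ i0 → (i0 - 1) + c ≤ K →
    ((List.range' i0 c).map (fun k : Nat => (k : Int))).foldl
      (fun r i => PySem.Int.floordiv (r * ((N : Int) - (K : Int) + i)) i)
      ((N - K + (i0 - 1)).choose (i0 - 1) : Int)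
    = ((N - K + ((i0 - 1) + c)).choose ((i0 - 1) + c) : Int) := by
  intro c
  induction c with
  | zero => intro i0 _ _; simp
  | succ c ih =>
    intro i0 hi0 hc
    rw [List.range'_succ, List.map_cons, List.foldl_cons]
    have e1 : (N : Int) - (K : Int) + (i0 : Int) = ((N - K + i0 : Nat) : Int) := by
      push_cast [Nat.cast_sub hK]; ring
    have e2 : ((N - K + (i0 - 1)).choose (i0 - 1) : Int) * ((N - K + i0 : Nat) : Int)
        = (((N - K + (i0 - 1)).choose (i0 - 1) * (N - K + i0) : Nat) : Int) := by
      push_cast; ring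
    rw [e1, e2, PySem.Int.floordiv_natCast]
    have hdiv : ((N - K + (i0 - 1)).choose (i0 - 1) * (N - K + i0)) / i0
        = (N - K + i0).choose i0 := by
      have h := Nat.add_one_mul_choose_eq (N - K + (i0 - 1)) (i0 - 1)
      rw [show (i0 - 1) + 1 = i0 from by omega,
        show (N - K + (i0 - 1)) + 1 = N - K + i0 from by omega] at h
      rw [Nat.mul_comm, h, Nat.mul_div_cancel _ (by omega : 0 < i0)]
    rw [hdiv]
    have := ih (i0 + 1) (by omega) (by omega)
    rw [show (i0 + 1) - 1 = i0 from by omega] at this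
    rw [show (i0 - 1) + (c + 1) = i0 + c from by omega]
    exact this

lemma pvAlt_eq (f n : Nat) :
    dynamic_programing_alt (f : Int) (n : Int) = ((f + n).choose (f + 1) : Int) := by
  rcases Nat.eq_zero_or_pos n with hn | hn
  · subst hn
    have : ((f : Int) + 1 > (f : Int) + 0) := by omega
    simp [dynamic_programing_alt]
  · have hle : ¬ ((f : Int) + 1 > (f : Int) + (n : Int)) := by omega
    unfold dynamic_programing_alt
    rw [if_neg hle]
    have hsub : (f : Int) + (n : Int) = ((f + n : Nat) : Int) := by push_cast; ring
    have hmin : min ((f : Int) + 1) (((f + n : Nat) : Int) - ((f : Int) + 1))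
        = ((min (f + 1) (n - 1) : Nat) : Int) := by
      push_cast [Nat.cast_min]
      omega
    rw [hsub, hmin]
    show (PySem.List.pyRange 1 (((min (f + 1) (n - 1) : Nat) : Int) + 1) 1).foldl
      (fun r i => PySem.Int.floordiv
        (r * (((f + n : Nat) : Int) - ((min (f + 1) (n - 1) : Nat) : Int) + i)) i) 1
      = ((f + n).choose (f + 1) : Int)
    have hrange : PySem.List.pyRange 1 (((min (f + 1) (n - 1) : Nat) : Int) + 1) 1
        = (List.range' 1 (min (f + 1) (n - 1))).map (fun k : Nat => (k : Int)) := by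
      have := pvRange_one_nat 1 (min (f + 1) (n - 1))
      rw [show ((1 : Nat) : Int) + ((min (f + 1) (n - 1) : Nat) : Int)
          = ((min (f + 1) (n - 1) : Nat) : Int) + 1 from by ring] at this
      exact_mod_cast this
    rw [hrange]
    have hKle : min (f + 1) (n - 1) ≤ f + n := by omega
    have := pvProd (f + n) (min (f + 1) (n - 1)) hKle (min (f + 1) (n - 1)) 1 (by omega) (by omega)
    simp only [Nat.sub_self, Nat.choose_zero_right, Nat.cast_one, Nat.zero_add] at this
    rw [this]
    congr 1
    rcases Nat.le_total (f + 1) (n - 1) with h | h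
    · rw [Nat.min_eq_left h]
      congr 1
      omega
    · rw [Nat.min_eq_right h]
      rw [show f + n - (n - 1) + (n - 1) = f + n from by omega]
      rw [show n - 1 = (f + n) - (f + 1) from by omega]
      exact Nat.choose_symm (by omega)

-- ===== VERDICT (by name: the statement is the Claim_ definition above) =====
theorem dynamic_programing_spec : Claim_equal_dynamic_programing := by
  intro floor no _ hpre
  obtain ⟨hf, hn⟩ := hpre
  unfold Spec_dynamic_programing
  obtain ⟨f, rfl⟩ := Int.eq_ofNat_of_zero_le hf
  obtain ⟨n, rfl⟩ := Int.eq_ofNat_of_zero_le hn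
  rw [pvA_eq, pvAlt_eq]
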